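-- pv_equiv track=rewrite | github.com/jonathf/matlab2cpp | src/matlab2cpp/datatype.py | get_mem
-- ===== SOURCE A (Python) =====
-- mem0 = {"uword", "uvec", "urowvec", "umat", "ucube"}
--
-- mem1 = {"int", "ivec", "irowvec", "imat", "icube"}
--
-- mem2 = {"float", "fvec", "frowvec", "fmat", "fcube"}
--
-- mem3 = {"double", "vec", "rowvec", "mat", "cube"}
--
-- mem4 = {"cx_double", "cx_vec", "cx_rowvec", "cx_mat", "cx_cube"}
--
-- others = {"char", "string", "TYPE", "func_lambda", "struct", "structs", "cell",
--         "wall_clock", "SPlot"}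
--
-- def get_mem(val):
--
--     while val[-1] == "*":
--         val = val[:-1]
--
--     if val in mem0:    mem = 0
--     elif val in mem1:  mem = 1
--     elif val in mem2:  mem = 2
--     elif val in mem3:  mem = 3
--     elif val in mem4:  mem = 4
--     elif val in others: mem = None
--     else:
--         raise ValueError("Datatype '%s' not recognized" % val)
--
--     return mem
-- ===== SOURCE B (Python) =====
-- _OTHERS = {"char", "string", "TYPE", "func_lambda", "struct", "structs", "cell",
--            "wall_clock", "SPlot"}
--
-- _SHAPES = ("vec", "rowvec", "mat", "cube")
--
-- # (prefix, scalar name, category); "" must come last since it prefixes everything.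
-- _FAMILIES = (("u", "uword", 0), ("i", "int", 1), ("f", "float", 2), ("", "double", 3))
--
--
-- def get_mem(val):
--     while val[-1] == "*":
--         val = val[:-1]
--
--     if val in _OTHERS:
--         return None
--
--     if val.startswith("cx_"):
--         rest = val[3:]
--         if rest == "double" or rest in _SHAPES:
--             return 4
--     else:
--         for prefix, scalar, k in _FAMILIES:
--             if val == scalar:
--                 return k
--             if val.startswith(prefix) and val[len(prefix):] in _SHAPES:
--                 return k
--
--     raise ValueError("Datatype '%s' not recognized" % val)
-- ===== Notes on version B (the rewrite author's own statement) =====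
-- stated objective: alternative
-- what changed: Replaces the six hard-coded membership sets with a grammar parse: the name is decomposed as an optional family prefix (u/i/f/cx_/empty) plus a scalar name or shape suffix (vec/rowvec/mat/cube), and the category is the family's index.
import Mathlib
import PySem

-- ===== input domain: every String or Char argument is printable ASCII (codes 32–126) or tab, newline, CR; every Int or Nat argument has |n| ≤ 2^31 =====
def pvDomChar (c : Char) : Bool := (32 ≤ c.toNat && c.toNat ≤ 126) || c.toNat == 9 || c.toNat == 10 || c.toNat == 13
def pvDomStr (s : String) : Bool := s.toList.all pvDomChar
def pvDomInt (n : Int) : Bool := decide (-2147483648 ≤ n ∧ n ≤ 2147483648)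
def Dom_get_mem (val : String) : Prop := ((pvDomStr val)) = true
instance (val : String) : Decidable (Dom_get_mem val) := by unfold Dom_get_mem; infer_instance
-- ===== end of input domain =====

-- B replaces the six hard-coded membership sets by a grammar parse (family prefix + shape
-- suffix or scalar name); objective: alternative. Return-value equivalence on Pre_.

-- ===== PORT A =====
def mem0A : PySem.Set String := PySem.Set.ofList ["uword", "uvec", "urowvec", "umat", "ucube"]
def mem1A : PySem.Set String := PySem.Set.ofList ["int", "ivec", "irowvec", "imat", "icube"]
def mem2A : PySem.Set String := PySem.Set.ofList ["float", "fvec", "frowvec", "fmat", "fcube"]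
def mem3A : PySem.Set String := PySem.Set.ofList ["double", "vec", "rowvec", "mat", "cube"]
def mem4A : PySem.Set String := PySem.Set.ofList ["cx_double", "cx_vec", "cx_rowvec", "cx_mat", "cx_cube"]
def othersA : PySem.Set String := PySem.Set.ofList ["char", "string", "TYPE", "func_lambda", "struct", "structs", "cell", "wall_clock", "SPlot"]

-- `while val[-1] == "*": val = val[:-1]` — val[-1] is PySem.List.pyGet? l (-1) (none = IndexError),
-- val[:-1] is l.dropLast.
def stripLoopA (l : List Char) : Option (List Char) :=
  match h : PySem.List.pyGet? l (-1) with
  | none => none                      -- IndexError on val[-1]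
  | some c =>
      if c = '*' then stripLoopA l.dropLast else some l
termination_by l.length
decreasing_by
  have hne : l ≠ [] := by
    intro he; subst he; simp [PySem.List.pyGet?, PySem.List.pyIdx?] at h
  have : 0 < l.length := List.length_pos_iff.mpr hne
  simp [List.length_dropLast]; omega

def get_mem (val : String) : Option Int :=
  match stripLoopA val.toList with
  | none => none                      -- IndexError (excluded by Pre_)
  | some l =>
      let v := String.ofList l
      if PySem.Set.contains mem0A v then some 0
      else if PySem.Set.contains mem1A v then some 1
      else if PySem.Set.contains mem2A v then some 2
      else if PySem.Set.contains mem3A v then some 3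
      else if PySem.Set.contains mem4A v then some 4
      else if PySem.Set.contains othersA v then none   -- mem = None
      else none                       -- ValueError (excluded by Pre_)

-- ===== PORT B =====
-- B works on the character list; startswith p → List.isPrefixOf, val[len(p):] → drop.
def othersB : List (List Char) :=
  ["char".toList, "string".toList, "TYPE".toList, "func_lambda".toList, "struct".toList,
   "structs".toList, "cell".toList, "wall_clock".toList, "SPlot".toList]

def shapesB : List (List Char) := ["vec".toList, "rowvec".toList, "mat".toList, "cube".toList]

def familiesB : List (List Char × List Char × Int) :=
  [(['u'], "uword".toList, 0), (['i'], "int".toList, 1),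
   (['f'], "float".toList, 2), (([] : List Char), "double".toList, 3)]

-- the `for prefix, scalar, k in _FAMILIES` loop; none = fell through (ValueError)
def tryFamiliesB : List (List Char × List Char × Int) → List Char → Option (Option Int)
  | [], _ => none
  | (p, s, k) :: rest, l =>
      if l = s then some (some k)
      else if List.isPrefixOf p l ∧ l.drop p.length ∈ shapesB then some (some k)
      else tryFamiliesB rest l

-- classify the stripped name; some r = return r, none = ValueError (excluded by Pre_)
def classifyB (l : List Char) : Option (Option Int) :=
  if l ∈ othersB then some none
  else if List.isPrefixOf ['c', 'x', '_'] l then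
    (if l.drop 3 = "double".toList ∨ l.drop 3 ∈ shapesB then some (some 4) else none)
  else tryFamiliesB familiesB l

-- B's `while val[-1] == "*"` loop (same construct as A's source keeps it)
def stripLoopB (l : List Char) : Option (List Char) :=
  match h : PySem.List.pyGet? l (-1) with
  | none => none
  | some c =>
      if c = '*' then stripLoopB l.dropLast else some l
termination_by l.length
decreasing_by
  have hne : l ≠ [] := by
    intro he; subst he; simp [PySem.List.pyGet?, PySem.List.pyIdx?] at h
  have : 0 < l.length := List.length_pos_iff.mpr hne
  simp [List.length_dropLast]; omega

def get_mem_alt (val : String) : Option Int :=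
  match stripLoopB val.toList with
  | none => none                      -- IndexError (excluded by Pre_)
  | some l =>
      match classifyB l with
      | some r => r
      | none => none                  -- ValueError (excluded by Pre_)

-- ===== PRECONDITION & SPEC =====
-- Pre_: after removing the trailing run of '*', the base names a known datatype. Outside it the
-- Python A raises (IndexError when stripping leaves no character, ValueError on an unrecognized name).
def knownKeysP : List String :=
  ["uword", "uvec", "urowvec", "umat", "ucube",
   "int", "ivec", "irowvec", "imat", "icube",
   "float", "fvec", "frowvec", "fmat", "fcube",
   "double", "vec", "rowvec", "mat", "cube",
   "cx_double", "cx_vec", "cx_rowvec", "cx_mat", "cx_cube",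
   "char", "string", "TYPE", "func_lambda", "struct",
   "structs", "cell", "wall_clock", "SPlot"]

def Pre_get_mem (val : String) : Prop :=
  String.ofList ((val.toList.reverse.dropWhile (fun c => c = '*')).reverse) ∈ knownKeysP
instance (val : String) : Decidable (Pre_get_mem val) := by unfold Pre_get_mem; infer_instance

def pvWitness_get_mem : String := "vec*"

def Spec_get_mem (val : String) (out : Option Int) : Prop := out = get_mem_alt val
instance (val : String) (out : Option Int) : Decidable (Spec_get_mem val out) := by unfold Spec_get_mem; infer_instance

-- ===== CLAIM (what is proved, stated in full; the proofs are below) =====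
def Claim_equal_get_mem : Prop := ∀ (val : String), Dom_get_mem val → Pre_get_mem val → Spec_get_mem val (get_mem val)

-- ===== LEMMAS AND PROOFS =====

-- A's asterisk-stripping loop computes exactly "drop the trailing '*' run",
-- provided the remaining base is nonempty (stated on the reversed list).
lemma stripLoopA_eq_dropWhile (r : List Char) (h : r.dropWhile (fun c => c = '*') ≠ []) :
    stripLoopA r.reverse = some (r.dropWhile (fun c => c = '*')).reverse := by
  induction r with
  | nil => simp [List.dropWhile] at h
  | cons c t ih =>
      rw [stripLoopA]
      have hget : PySem.List.pyGet? ((c :: t).reverse) (-1) = some c := by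
        rw [List.reverse_cons]
        exact PySem.List.pyGet?_neg_one_append_singleton _ _
      split
      case h_1 heq => rw [hget] at heq; cases heq
      case h_2 c1 heq =>
      rw [hget] at heq
      injection heq with heq
      subst heq
      simp only [List.reverse_cons]
      by_cases hc : c = '*'
      · subst hc
        rw [if_pos rfl]
        have hd : (t.reverse ++ ['*']).dropLast = t.reverse := by simp
        rw [hd]
        have ht : t.dropWhile (fun c => c = '*') ≠ [] := by
          simpa [List.dropWhile] using h
        rw [ih ht]
        simp [List.dropWhile]
      · rw [if_neg hc]
        have : (c :: t).dropWhile (fun c => c = '*') = c :: t := by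
          simp [List.dropWhile, hc]
        rw [this]
        simp

-- B's stripping loop is the same while loop; same characterisation.
lemma stripLoopB_eq_dropWhile (r : List Char) (h : r.dropWhile (fun c => c = '*') ≠ []) :
    stripLoopB r.reverse = some (r.dropWhile (fun c => c = '*')).reverse := by
  induction r with
  | nil => simp [List.dropWhile] at h
  | cons c t ih =>
      rw [stripLoopB]
      have hget : PySem.List.pyGet? ((c :: t).reverse) (-1) = some c := by
        rw [List.reverse_cons]
        exact PySem.List.pyGet?_neg_one_append_singleton _ _
      split
      case h_1 heq => rw [hget] at heq; cases heq
      case h_2 c1 heq =>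
      rw [hget] at heq
      injection heq with heq
      subst heq
      simp only [List.reverse_cons]
      by_cases hc : c = '*'
      · subst hc
        rw [if_pos rfl]
        have hd : (t.reverse ++ ['*']).dropLast = t.reverse := by simp
        rw [hd]
        have ht : t.dropWhile (fun c => c = '*') ≠ [] := by
          simpa [List.dropWhile] using h
        rw [ih ht]
        simp [List.dropWhile]
      · rw [if_neg hc]
        have : (c :: t).dropWhile (fun c => c = '*') = c :: t := by
          simp [List.dropWhile, hc]
        rw [this]
        simp

-- A's if-chain and B's grammar parse agree on every known datatype name
lemma table_agree (v : String) (hv : v ∈ knownKeysP) :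
    (if PySem.Set.contains mem0A v then (some 0 : Option Int)
     else if PySem.Set.contains mem1A v then some 1
     else if PySem.Set.contains mem2A v then some 2
     else if PySem.Set.contains mem3A v then some 3
     else if PySem.Set.contains mem4A v then some 4
     else if PySem.Set.contains othersA v then none
     else none) =
    (match classifyB v.toList with
     | some r => r
     | none => none) := by
  fin_cases hv <;> decide

lemma base_ne_nil (val : String) (h : Pre_get_mem val) :
    val.toList.reverse.dropWhile (fun c => c = '*') ≠ [] := by
  intro he
  unfold Pre_get_mem at h
  rw [he] at h
  simp only [List.reverse_nil] at h
  revert h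
  decide

-- ===== VERDICT (by name: the statement is the Claim_ definition above) =====
theorem get_mem_spec : Claim_equal_get_mem := by
  intro val _ hpre
  unfold Spec_get_mem get_mem get_mem_alt
  have hne := base_ne_nil val hpre
  have hA := stripLoopA_eq_dropWhile val.toList.reverse hne
  have hB := stripLoopB_eq_dropWhile val.toList.reverse hne
  rw [List.reverse_reverse] at hA hB
  rw [hA, hB]
  have := table_agree _ hpre
  simpa using this
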